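-- pv_equiv track=rewrite | github.com/joeyuan19/misc-projects | Fallout/terminal_hack.py | dmax
-- ===== SOURCE A (Python) =====
-- def dmax(d):
--     m = 0
--     _k = ''
--     for k,v in d.items():
--         if v > m:
--             _k = k
--             m = v
--     return _k,m
-- ===== SOURCE B (Python) =====
-- def dmax(d):
--     # two passes: max value (floored at 0 by the <= 0 check), then first key attaining it
--     m = max(d.values(), default=0)
--     if m <= 0:
--         return '', 0
--     return next(k for k, v in d.items() if v == m), m
-- ===== Notes on version B (the rewrite author's own statement) =====
-- stated objective: idiomatic
-- what changed: Replaced the running best-so-far accumulator loop with a max-then-find decomposition: take the maximum of the values (defaulting to zero), return the empty-key sentinel if it is not positive, else the first key attaining that maximum.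
import Mathlib
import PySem

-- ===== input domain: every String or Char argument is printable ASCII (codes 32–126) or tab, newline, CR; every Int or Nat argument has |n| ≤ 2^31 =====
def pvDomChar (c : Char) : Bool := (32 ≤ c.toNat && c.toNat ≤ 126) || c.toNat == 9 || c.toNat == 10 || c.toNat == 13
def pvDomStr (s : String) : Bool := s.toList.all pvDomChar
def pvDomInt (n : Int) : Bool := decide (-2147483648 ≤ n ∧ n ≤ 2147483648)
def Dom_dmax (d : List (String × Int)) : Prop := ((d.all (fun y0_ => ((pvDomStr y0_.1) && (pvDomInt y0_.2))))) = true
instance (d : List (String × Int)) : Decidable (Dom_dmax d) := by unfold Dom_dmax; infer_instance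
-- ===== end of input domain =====

-- B replaces A's running best-so-far loop with a max-then-find decomposition (same O(n) cost, more idiomatic).


-- ===== PORT A =====
-- for k,v in d.items(): if v > m: _k, m = k, v   (m, _k start at 0, '')
def dmax (d : List (String × Int)) : String × Int :=
  d.foldl (fun acc kv => if kv.2 > acc.2 then (kv.1, kv.2) else acc) ("", 0)

-- ===== PORT B =====
-- m = max(d.values(), default=0); if m <= 0: ('',0); else first (k,v) with v == m.
-- The 'none' branch of the match is unreachable (next cannot fail: a positive m is a value of d).
def dmax_alt (d : List (String × Int)) : String × Int :=
  let m := (PySem.List.max? (d.map Prod.snd) (fun v => v)).getD 0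
  if m ≤ 0 then ("", 0)
  else
    match d.find? (fun kv => kv.2 == m) with
    | some kv => (kv.1, m)
    | none => ("", 0)

-- ===== PRECONDITION & SPEC =====
def Spec_dmax (d : List (String × Int)) (out : String × Int) : Prop := out = dmax_alt d
instance (d : List (String × Int)) (out : String × Int) : Decidable (Spec_dmax d out) := by unfold Spec_dmax; infer_instance

-- ===== CLAIM (what is proved, stated in full; the proofs are below) =====
def Claim_equal_dmax : Prop := ∀ (d : List (String × Int)), Dom_dmax d → Spec_dmax d (dmax d)

-- ===== LEMMAS AND PROOFS =====

-- reference function: first pair whose value is positive and at least every later value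
def dmaxF : List (String × Int) → String × Int
  | [] => ("", 0)
  | x :: t => if 0 < x.2 ∧ (dmaxF t).2 ≤ x.2 then x else dmaxF t

theorem dmaxF_pos_or_zero (d : List (String × Int)) :
    0 < (dmaxF d).2 ∨ dmaxF d = ("", 0) := by
  induction d with
  | nil => right; rfl
  | cons x t ih =>
    by_cases h : 0 < x.2 ∧ (dmaxF t).2 ≤ x.2
    · left; simp [dmaxF, h]
    · simpa [dmaxF, h] using ih

theorem dmax_foldl_eq (d : List (String × Int)) (k : String) (m : Int) (hm : 0 ≤ m) :
    d.foldl (fun acc kv => if kv.2 > acc.2 then (kv.1, kv.2) else acc) (k, m)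
      = if (dmaxF d).2 > m then dmaxF d else (k, m) := by
  induction d generalizing k m with
  | nil =>
    rcases dmaxF_pos_or_zero [] with h | h
    · simp [dmaxF] at h
    · simp [h]; intro hc; omega
  | cons x t ih =>
    simp only [List.foldl_cons]
    by_cases hx : x.2 > m
    · rw [show (if x.2 > m then (x.1, x.2) else (k, m)) = (x.1, x.2) by simp [hx]]
      rw [ih x.1 x.2 (by omega)]
      by_cases hft : (dmaxF t).2 > x.2
      · have hcond : ¬ (0 < x.2 ∧ (dmaxF t).2 ≤ x.2) := by omega
        simp [dmaxF, hcond, hft]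
        omega
      · have hcond : 0 < x.2 ∧ (dmaxF t).2 ≤ x.2 := ⟨by omega, by omega⟩
        simp [dmaxF, hcond, hft, hx]
    · rw [show (if x.2 > m then (x.1, x.2) else (k, m)) = (k, m) by simp [hx]]
      rw [ih k m hm]
      by_cases hcond : 0 < x.2 ∧ (dmaxF t).2 ≤ x.2
      · have h1 : ¬ (dmaxF t).2 > m := by omega
        have h2 : ¬ x.2 > m := hx
        simp [dmaxF, hcond, h1]
        omega
      · simp [dmaxF, hcond]

theorem dmax_eq_dmaxF (d : List (String × Int)) : dmax d = dmaxF d := by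
  unfold dmax
  rw [dmax_foldl_eq d "" 0 le_rfl]
  rcases dmaxF_pos_or_zero d with h | h
  · simp; omega
  · simp [h]

theorem foldl_max_max (t : List Int) (a b : Int) :
    t.foldl max (max a b) = max a (t.foldl max b) := by
  induction t generalizing b with
  | nil => simp
  | cons y t ih =>
    simp only [List.foldl_cons]
    rw [max_assoc, ih]

theorem dmaxF_snd (d : List (String × Int)) :
    (dmaxF d).2 = max 0 ((PySem.List.max? (d.map Prod.snd) (fun v => v)).getD 0) := by
  induction d with
  | nil =>
    rw [show PySem.List.max? (([] : List (String × Int)).map Prod.snd) (fun v => v) = none from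
      (PySem.List.max?_eq_none_iff _ _).mpr (by simp)]
    simp [dmaxF]
  | cons x t ih =>
    have h1 : PySem.List.max? ((x :: t).map Prod.snd) (fun v => v)
        = some ((t.map Prod.snd).foldl max x.2) := by
      simpa using PySem.List.max?_id_cons (x := x.2) (t := t.map Prod.snd)
    rw [h1]
    simp only [Option.getD_some]
    by_cases hcond : 0 < x.2 ∧ (dmaxF t).2 ≤ x.2
    · -- (x::t') max is x.2 here: every value of t is ≤ (dmaxF t).2 ≤ x.2
      simp only [dmaxF]
      rw [if_pos hcond]
      rcases t with _ | ⟨y, t'⟩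
      · simp; omega
      · have h2 : PySem.List.max? ((y :: t').map Prod.snd) (fun v => v)
            = some ((t'.map Prod.snd).foldl max y.2) := by
          simpa using PySem.List.max?_id_cons (x := y.2) (t := t'.map Prod.snd)
        rw [h2] at ih
        simp only [Option.getD_some] at ih
        have : (t'.map Prod.snd).foldl max (max x.2 y.2)
            = max x.2 ((t'.map Prod.snd).foldl max y.2) := foldl_max_max _ _ _
        simp only [List.map_cons, List.foldl_cons, this]
        omega
    · simp only [dmaxF, hcond, if_neg, not_false_iff]
      rcases t with _ | ⟨y, t'⟩
      · simp [dmaxF] at hcond ⊢; omega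
      · have h2 : PySem.List.max? ((y :: t').map Prod.snd) (fun v => v)
            = some ((t'.map Prod.snd).foldl max y.2) := by
          simpa using PySem.List.max?_id_cons (x := y.2) (t := t'.map Prod.snd)
        rw [h2] at ih
        simp only [Option.getD_some] at ih
        have : (t'.map Prod.snd).foldl max (max x.2 y.2)
            = max x.2 ((t'.map Prod.snd).foldl max y.2) := foldl_max_max _ _ _
        simp only [List.map_cons, List.foldl_cons, this]
        omega

theorem dmaxF_find (d : List (String × Int)) (h : 0 < (dmaxF d).2) :
    d.find? (fun kv => kv.2 == (dmaxF d).2) = some (dmaxF d) := by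
  induction d with
  | nil => simp [dmaxF] at h
  | cons x t ih =>
    by_cases hcond : 0 < x.2 ∧ (dmaxF t).2 ≤ x.2
    · simp [dmaxF, hcond]
    · have hft : dmaxF (x :: t) = dmaxF t := by simp [dmaxF, hcond]
      rw [hft] at h ⊢
      have hne : ¬ (x.2 == (dmaxF t).2) = true := by
        simp only [beq_iff_eq]
        intro he; exact hcond ⟨by omega, by omega⟩
      rw [List.find?_cons_of_neg]
      · exact ih h
      · simpa using hne

theorem dmax_alt_eq_dmaxF (d : List (String × Int)) : dmax_alt d = dmaxF d := by
  unfold dmax_alt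
  set m := (PySem.List.max? (d.map Prod.snd) (fun v => v)).getD 0 with hm
  have hsnd : (dmaxF d).2 = max 0 m := dmaxF_snd d
  by_cases hle : m ≤ 0
  · rw [if_pos hle]
    rcases dmaxF_pos_or_zero d with h | h
    · omega
    · exact h.symm
  · rw [if_neg hle]
    have hpos : 0 < (dmaxF d).2 := by omega
    have heq : (dmaxF d).2 = m := by omega
    rw [← heq, dmaxF_find d hpos]

-- ===== VERDICT (by name: the statement is the Claim_ definition above) =====
theorem dmax_spec : Claim_equal_dmax := by
  intro d _
  unfold Spec_dmax
  rw [dmax_eq_dmaxF, dmax_alt_eq_dmaxF]
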